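-- pv_equiv track=rewrite | github.com/lunalovecode/misc-problems | strong_password.py | minimumNumber
-- ===== SOURCE A (Python) =====
-- def minimumNumber(n, password):
--     numbers = "0123456789"
--     lower_case = "abcdefghijklmnopqrstuvwxyz"
--     upper_case = "ABCDEFGHIJKLMNOPQRSTUVWXYZ"
--     special_characters = "!@#$%^&*()-+"
--     has_nums, has_lower, has_upper, has_special_chars, long_enough = False, False, False, False, False
--     needed = 0
--     if any(x in password for x in numbers):
--         has_nums = True
--     if any(x in password for x in lower_case):
--         has_lower = True
--     if any(x in password for x in upper_case):
--         has_upper = True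
--     if any(x in password for x in special_characters):
--         has_special_chars = True
--     if len(password) >= 6:
--         long_enough = True
--     for x in [has_nums, has_lower, has_upper, has_special_chars]:
--         if x == False:
--             needed += 1
--
--     if not long_enough and len(password) + needed < 6:
--         needed += 6 - (len(password) + needed)
--
--     return needed
-- ===== SOURCE B (Python) =====
-- def minimumNumber(n, password):
--     numbers = "0123456789"
--     lower_case = "abcdefghijklmnopqrstuvwxyz"
--     upper_case = "ABCDEFGHIJKLMNOPQRSTUVWXYZ"
--     special_characters = "!@#$%^&*()-+"
--     has_nums = has_lower = has_upper = has_special_chars = False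
--     for c in password:
--         has_nums = has_nums or c in numbers
--         has_lower = has_lower or c in lower_case
--         has_upper = has_upper or c in upper_case
--         has_special_chars = has_special_chars or c in special_characters
--     missing = [has_nums, has_lower, has_upper, has_special_chars].count(False)
--     return max(missing, 6 - len(password))
-- ===== Notes on version B (the rewrite author's own statement) =====
-- stated objective: simpler
-- what changed: Four separate any()-scans over the password become one combined pass flipping category flags, and the two-step padding arithmetic (loop-counted needed plus conditional top-up) collapses to the closed form max(missing, 6 - len(password)).
import Mathlib
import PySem

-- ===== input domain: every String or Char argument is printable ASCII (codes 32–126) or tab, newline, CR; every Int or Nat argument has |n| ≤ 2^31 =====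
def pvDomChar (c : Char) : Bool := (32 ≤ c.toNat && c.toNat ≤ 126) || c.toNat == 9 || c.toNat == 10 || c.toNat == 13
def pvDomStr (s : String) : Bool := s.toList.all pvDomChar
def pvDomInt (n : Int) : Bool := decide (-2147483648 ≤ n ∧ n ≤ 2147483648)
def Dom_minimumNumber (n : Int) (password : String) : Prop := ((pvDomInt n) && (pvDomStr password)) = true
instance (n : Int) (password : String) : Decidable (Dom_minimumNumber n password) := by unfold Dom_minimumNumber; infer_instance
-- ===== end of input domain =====

-- B replaces A's four separate any()-scans over the password with one combined pass over its
-- characters and collapses the counted-needed-plus-conditional-top-up into max(missing, 6 - len)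
-- (objective: simpler); same return value on every input.

-- ===== PORT A =====
def minimumNumber (n : Int) (password : String) : Int :=
  let numbers := "0123456789"
  let lower_case := "abcdefghijklmnopqrstuvwxyz"
  let upper_case := "ABCDEFGHIJKLMNOPQRSTUVWXYZ"
  let special_characters := "!@#$%^&*()-+"
  -- 'x in password' for a single-character x is character membership (exact on this domain)
  let has_nums := numbers.toList.any (fun x => password.toList.contains x)
  let has_lower := lower_case.toList.any (fun x => password.toList.contains x)
  let has_upper := upper_case.toList.any (fun x => password.toList.contains x)
  let has_special_chars := special_characters.toList.any (fun x => password.toList.contains x)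
  let long_enough := decide (PySem.Str.len password ≥ 6)
  let needed : Int := [has_nums, has_lower, has_upper, has_special_chars].foldl
    (fun acc x => if x = false then acc + 1 else acc) 0
  if long_enough = false ∧ PySem.Str.len password + needed < 6 then
    needed + (6 - (PySem.Str.len password + needed))
  else
    needed

-- ===== PORT B =====
def minimumNumber_alt (n : Int) (password : String) : Int :=
  let numbers := "0123456789"
  let lower_case := "abcdefghijklmnopqrstuvwxyz"
  let upper_case := "ABCDEFGHIJKLMNOPQRSTUVWXYZ"
  let special_characters := "!@#$%^&*()-+"
  let flags := password.toList.foldl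
    (fun (s : Bool × Bool × Bool × Bool) c =>
      (s.1 || numbers.toList.contains c,
       s.2.1 || lower_case.toList.contains c,
       s.2.2.1 || upper_case.toList.contains c,
       s.2.2.2 || special_characters.toList.contains c))
    (false, false, false, false)
  let missing : Int := ([flags.1, flags.2.1, flags.2.2.1, flags.2.2.2].count false : Nat)
  max missing (6 - PySem.Str.len password)

-- ===== PRECONDITION & SPEC =====
def Spec_minimumNumber (n : Int) (password : String) (out : Int) : Prop := out = minimumNumber_alt n password
instance (n : Int) (password : String) (out : Int) : Decidable (Spec_minimumNumber n password out) := by unfold Spec_minimumNumber; infer_instance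

-- ===== CLAIM (what is proved, stated in full; the proofs are below) =====
def Claim_equal_minimumNumber : Prop := ∀ (n : Int) (password : String), Dom_minimumNumber n password → Spec_minimumNumber n password (minimumNumber n password)

-- ===== LEMMAS AND PROOFS =====

lemma pv_foldFlags (ns ls us ss : List Char) (l : List Char) (a b c d : Bool) :
    l.foldl (fun (s : Bool × Bool × Bool × Bool) ch =>
      (s.1 || ns.contains ch, s.2.1 || ls.contains ch,
       s.2.2.1 || us.contains ch, s.2.2.2 || ss.contains ch)) (a, b, c, d)
    = (a || l.any (fun ch => ns.contains ch), b || l.any (fun ch => ls.contains ch),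
       c || l.any (fun ch => us.contains ch), d || l.any (fun ch => ss.contains ch)) := by
  induction l generalizing a b c d with
  | nil => simp
  | cons x xs ih => simp only [List.foldl_cons, List.any_cons, ih, Bool.or_assoc]

lemma pv_any_contains_comm (xs ys : List Char) :
    xs.any (fun x => ys.contains x) = ys.any (fun y => xs.contains y) := by
  rw [Bool.eq_iff_iff]
  simp only [List.any_eq_true, List.contains_iff_mem]
  exact ⟨fun ⟨x, hx, hy⟩ => ⟨x, hy, hx⟩, fun ⟨x, hx, hy⟩ => ⟨x, hy, hx⟩⟩


-- ===== VERDICT (by name: the statement is the Claim_ definition above) =====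
theorem minimumNumber_spec : Claim_equal_minimumNumber := by
  intro n password _
  unfold Spec_minimumNumber minimumNumber minimumNumber_alt
  simp only [pv_foldFlags, Bool.false_or,
    pv_any_contains_comm _ password.toList]
  have hL : 0 ≤ PySem.Str.len password := by
    simp [PySem.Str.len_eq]
  generalize PySem.Str.len password = L at hL
  generalize password.toList.any (fun y => "0123456789".toList.contains y) = g1
  generalize password.toList.any (fun y => "abcdefghijklmnopqrstuvwxyz".toList.contains y) = g2
  generalize password.toList.any (fun y => "ABCDEFGHIJKLMNOPQRSTUVWXYZ".toList.contains y) = g3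
  generalize password.toList.any (fun y => "!@#$%^&*()-+".toList.contains y) = g4
  cases g1 <;> cases g2 <;> cases g3 <;> cases g4 <;>
    simp_all [List.foldl, List.count, List.countP, List.countP.go] <;> omega
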